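-- pv_equiv track=rewrite | github.com/Akunor/freecodecamp | daily-challenges/2026.02.14 Challenge.py | get_difficulty
-- ===== SOURCE A (Python) =====
-- def get_difficulty(track):
--     segs = list(track)
--     score = 0
--
--     for i, char in enumerate(segs):
--         if char == 'L':
--             if segs[i - 1] == 'R':
--                 score += 15
--             else:
--                 score += 5
--
--         elif char == 'R':
--             if segs[i - 1] == 'L':
--                 score += 15
--             else:
--                 score += 5
--
--     if 0 <= score <= 100:
--         return 'Easy'
--     elif 101 <= score <= 200:
--         return 'Medium'
--     elif score > 200:
--         return 'Hard'
-- ===== SOURCE B (Python) =====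
-- def get_difficulty(track):
--     letters = sum(c in 'LR' for c in track)
--     rotated = track[-1:] + track[:-1]
--     alternations = sum((p, c) in (('L', 'R'), ('R', 'L')) for p, c in zip(rotated, track))
--     score = 5 * letters + 10 * alternations
--     if score <= 100:
--         return 'Easy'
--     if score <= 200:
--         return 'Medium'
--     return 'Hard'
-- ===== Notes on version B (the rewrite author's own statement) =====
-- stated objective: alternative
-- what changed: Replaces the single indexed loop with wrap-around lookback (segs[i-1]) by two independent counting passes: count L/R letters and count alternating adjacent pairs over zip of the rotated track with the track, then combine arithmetically as 5*letters + 10*alternations.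
import Mathlib
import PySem

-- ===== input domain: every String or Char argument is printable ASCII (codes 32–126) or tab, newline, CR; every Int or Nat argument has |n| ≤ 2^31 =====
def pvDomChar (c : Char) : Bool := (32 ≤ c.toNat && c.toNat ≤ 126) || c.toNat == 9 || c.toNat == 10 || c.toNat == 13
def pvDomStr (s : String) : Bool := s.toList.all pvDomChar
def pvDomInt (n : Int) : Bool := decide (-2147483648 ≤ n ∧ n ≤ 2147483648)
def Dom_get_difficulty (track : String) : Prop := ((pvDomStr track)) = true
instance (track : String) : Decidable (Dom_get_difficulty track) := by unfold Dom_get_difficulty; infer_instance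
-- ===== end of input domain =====

-- B replaces A's indexed loop with wrap-around lookback by two counting passes
-- (letters in 'LR', alternating pairs over zip of the rotated track) combined arithmetically.


-- ===== PORT A =====
def get_difficulty (track : String) : String :=
  let segs := track.toList
  let score : Int := (PySem.List.enumerate segs 0).foldl (fun score ic =>
    if ic.2 = 'L' then
      -- segs[i - 1]: in range whenever the loop body runs (segs nonempty), so pyGet? is some
      if PySem.List.pyGet? segs (ic.1 - 1) = some 'R' then score + 15 else score + 5
    else if ic.2 = 'R' then
      if PySem.List.pyGet? segs (ic.1 - 1) = some 'L' then score + 15 else score + 5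
    else score) 0
  if 0 ≤ score ∧ score ≤ 100 then "Easy"
  else if 101 ≤ score ∧ score ≤ 200 then "Medium"
  else if score > 200 then "Hard"
  else ""  -- Python falls through to None here; unreachable (score is a nonneg multiple of 5)

-- ===== PORT B =====
def get_difficulty_alt (track : String) : String :=
  let ls := track.toList
  let letters : Int := ls.countP (fun c => c == 'L' || c == 'R')
  let rotated := PySem.List.slice ls (some (-1)) none ++ PySem.List.slice ls none (some (-1))
  let alternations : Int := (rotated.zip ls).countP
    (fun pc => (pc.1 == 'L' && pc.2 == 'R') || (pc.1 == 'R' && pc.2 == 'L'))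
  let score : Int := 5 * letters + 10 * alternations
  if score ≤ 100 then "Easy"
  else if score ≤ 200 then "Medium"
  else "Hard"

-- ===== PRECONDITION & SPEC =====
def Spec_get_difficulty (track : String) (out : String) : Prop := out = get_difficulty_alt track
instance (track : String) (out : String) : Decidable (Spec_get_difficulty track out) := by unfold Spec_get_difficulty; infer_instance

-- ===== CLAIM (what is proved, stated in full; the proofs are below) =====
def Claim_equal_get_difficulty : Prop := ∀ (track : String), Dom_get_difficulty track → Spec_get_difficulty track (get_difficulty track)

-- ===== LEMMAS AND PROOFS =====

-- per-pair contribution (prev char, current char)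
def pvF (p c : Char) : Int :=
  if c = 'L' then (if p = 'R' then 15 else 5)
  else if c = 'R' then (if p = 'L' then 15 else 5)
  else 0

-- left-to-right walk carrying the previous character
def pvPairSum (prev : Char) : List Char → Int
  | [] => 0
  | c :: rest => pvF prev c + pvPairSum c rest

theorem pvPairSum_nonneg (prev : Char) (l : List Char) : 0 ≤ pvPairSum prev l := by
  induction l generalizing prev with
  | nil => simp [pvPairSum]
  | cons c rest ih =>
    have := ih c
    have : (0:Int) ≤ pvF prev c := by unfold pvF; split_ifs <;> norm_num
    simp only [pvPairSum]; omega

theorem pvAux_A (lfull : List Char) (t : List Char) : ∀ (k : Nat) (s : Int), 1 ≤ k →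
    lfull.drop k = t →
    (PySem.List.enumerate t (k:Int)).foldl (fun score ic =>
      if ic.2 = 'L' then
        if PySem.List.pyGet? lfull (ic.1 - 1) = some 'R' then score + 15 else score + 5
      else if ic.2 = 'R' then
        if PySem.List.pyGet? lfull (ic.1 - 1) = some 'L' then score + 15 else score + 5
      else score) s
      = s + pvPairSum (lfull.getD (k-1) ' ') t := by
  induction t with
  | nil => intro k s hk hd; simp [PySem.List.enumerate, pvPairSum]
  | cons c rest ih =>
    intro k s hk hd
    have hklen : k < lfull.length := by
      by_contra h
      have : lfull.drop k = [] := List.drop_eq_nil_of_le (by omega)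
      rw [hd] at this; simp at this
    have hdrop1 : lfull.drop (k+1) = rest := by
      have : lfull.drop (k+1) = (lfull.drop k).drop 1 := by
        rw [List.drop_drop]
      rw [this, hd]; rfl
    have hget : lfull.getD k ' ' = c := by
      have h0 : (lfull.drop k).getD 0 ' ' = c := by rw [hd]; rfl
      rw [← h0]; simp [List.getD, List.getElem?_drop]
    have hidx : PySem.List.pyGet? lfull ((k:Int) - 1) = some (lfull.getD (k-1) ' ') := by
      have h1 : (k:Int) - 1 = ((k-1 : Nat) : Int) := by omega
      rw [h1, PySem.List.pyGet?_natCast]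
      have : k - 1 < lfull.length := by omega
      simp [List.getD, List.getElem?_eq_getElem this]
    rw [PySem.List.enumerate_cons]
    simp only [List.foldl_cons]
    have hcast : ((k:Int) + 1) = ((k+1 : Nat) : Int) := by push_cast; ring
    rw [hcast, ih (k+1) _ (by omega) hdrop1]
    simp only [Nat.add_sub_cancel, hget]
    simp only [pvPairSum, hidx, pvF]
    split_ifs <;> simp_all <;> ring

-- B's zip-based pair list walks the same (prev, cur) pairs as pvPairSum
theorem pvZipSum (prev : Char) (l : List Char) :
    ((prev :: l.dropLast).zip l).foldl (fun s pc => s + pvF pc.1 pc.2) 0 = pvPairSum prev l := by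
  suffices h : ∀ (s : Int), ((prev :: l.dropLast).zip l).foldl (fun s pc => s + pvF pc.1 pc.2) s
      = s + pvPairSum prev l by
    have := h 0; omega
  induction l generalizing prev with
  | nil => intro s; simp [pvPairSum]
  | cons c rest ih =>
    intro s
    cases rest with
    | nil => simp [pvPairSum]
    | cons r rs =>
      have hdl : (c :: r :: rs).dropLast = c :: (r :: rs).dropLast := rfl
      rw [hdl, List.zip_cons_cons, List.foldl_cons]
      rw [ih c]
      simp [pvPairSum]
      ring

-- counting with a boolean predicate on pairs = fold of pvF, pointwise
theorem pvCount_split (ps : List (Char × Char)) :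
    (5 : Int) * (ps.countP (fun pc => pc.2 == 'L' || pc.2 == 'R'))
      + 10 * (ps.countP (fun pc => (pc.1 == 'L' && pc.2 == 'R') || (pc.1 == 'R' && pc.2 == 'L')))
      = ps.foldl (fun s pc => s + pvF pc.1 pc.2) 0 := by
  suffices h : ∀ (s : Int), ps.foldl (fun s pc => s + pvF pc.1 pc.2) s
      = s + 5 * (ps.countP (fun pc => pc.2 == 'L' || pc.2 == 'R'))
      + 10 * (ps.countP (fun pc => (pc.1 == 'L' && pc.2 == 'R') || (pc.1 == 'R' && pc.2 == 'L'))) by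
    rw [h 0]; ring
  induction ps with
  | nil => intro s; simp
  | cons pc rest ih =>
    intro s
    simp only [List.foldl_cons, List.countP_cons, ih]
    unfold pvF
    split_ifs with h1 h2 h3 h4 <;> simp_all <;> ring

-- letters counted on l = letters counted on the snd components of the zip
theorem pvCountP_zip_snd (r l : List Char) (h : r.length = l.length) :
    (l.zip r).countP (fun pc => pc.2 == 'L' || pc.2 == 'R')
      = r.countP (fun c => c == 'L' || c == 'R') := by
  induction r generalizing l with
  | nil => cases l <;> simp_all
  | cons c rest ih =>
    cases l with
    | nil => simp_all
    | cons x xs =>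
      simp only [List.zip_cons_cons, List.countP_cons]
      rw [ih xs (by simpa using h)]

-- the rotation used by B, for nonempty l
theorem pvRotated (l : List Char) (hl : l ≠ []) :
    PySem.List.slice l (some (-1)) none ++ PySem.List.slice l none (some (-1))
      = l.getLast hl :: l.dropLast := by
  rw [PySem.List.slice_from_neg_one, PySem.List.slice_to_neg_one]
  rw [List.drop_length_sub_one hl]; rfl

theorem pvLast_getD (l : List Char) (hl : l ≠ []) :
    PySem.List.pyGet? l (-1) = some (l.getLast hl) := by
  rw [PySem.List.pyGet?_neg_one, List.getLast?_eq_some_getLast]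

-- ===== VERDICT (by name: the statement is the Claim_ definition above) =====
theorem get_difficulty_spec : Claim_equal_get_difficulty := by
  intro track _
  unfold Spec_get_difficulty get_difficulty get_difficulty_alt
  cases hls : track.toList with
  | nil => simp [PySem.List.enumerate, PySem.List.slice]
  | cons x xs =>
    simp only [hls]
    have hlne : x :: xs ≠ [] := by simp
    -- A's score equals pvPairSum (last) over the whole list
    have hA : (PySem.List.enumerate (x :: xs) 0).foldl (fun score ic =>
        if ic.2 = 'L' then
          if PySem.List.pyGet? (x :: xs) (ic.1 - 1) = some 'R' then score + 15 else score + 5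
        else if ic.2 = 'R' then
          if PySem.List.pyGet? (x :: xs) (ic.1 - 1) = some 'L' then score + 15 else score + 5
        else score) 0 = pvPairSum ((x :: xs).getLast hlne) (x :: xs) := by
      rw [PySem.List.enumerate_cons]
      simp only [List.foldl_cons]
      have h0 : PySem.List.pyGet? (x :: xs) ((0:Int) - 1) = some ((x :: xs).getLast hlne) := by
        rw [show (0:Int) - 1 = -1 by ring, pvLast_getD (x :: xs) hlne]
      have hdrop : (x :: xs).drop 1 = xs := rfl
      rw [show (0:Int) + 1 = ((1:Nat):Int) by norm_num,
        pvAux_A (x :: xs) xs 1 _ (by omega) hdrop]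
      have hgd : (x :: xs).getD 0 ' ' = x := rfl
      simp only [Nat.sub_self, hgd]
      conv_rhs => rw [pvPairSum]
      simp only [h0, pvF]
      split_ifs <;> simp_all
    -- B's score equals the same
    have hrot := pvRotated (x :: xs) hlne
    have hB : (5 : Int) * ((x :: xs).countP (fun c => c == 'L' || c == 'R'))
        + 10 * (((PySem.List.slice (x :: xs) (some (-1)) none ++ PySem.List.slice (x :: xs) none (some (-1))).zip (x :: xs)).countP
            (fun pc => (pc.1 == 'L' && pc.2 == 'R') || (pc.1 == 'R' && pc.2 == 'L')))
        = pvPairSum ((x :: xs).getLast hlne) (x :: xs) := by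
      rw [hrot]
      rw [← pvZipSum ((x :: xs).getLast hlne) (x :: xs), ← pvCount_split]
      rw [pvCountP_zip_snd (r := x :: xs) (l := (x :: xs).getLast hlne :: (x :: xs).dropLast)
        (by simp [List.length_dropLast])]
    rw [hA, hB]
    have hnn := pvPairSum_nonneg ((x :: xs).getLast hlne) (x :: xs)
    split_ifs <;> first | rfl | omega
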